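-- pv_equiv track=rewrite | github.com/alexandraback/datacollection | solutions_5630113748090880_0/Python/gugugu/rank_and_file.py | _solve
-- ===== SOURCE A (Python) =====
-- def _solve(rows):
--     seen = {}
--     for row in rows:
--         for elem in row:
--             if elem not in seen:
--                 seen[elem] = 1
--             else:
--                 seen[elem] += 1
--     res = []
--     for elem, cnt in seen.items():
--         if cnt % 2 == 1:
--             res.append(elem)
--     res = sorted(res)
--     return ' '.join(map(str, res))
-- ===== SOURCE B (Python) =====
-- def _solve(rows):
--     odd = set()
--     for row in rows:
--         for elem in row:
--             if elem in odd:
--                 odd.remove(elem)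
--             else:
--                 odd.add(elem)
--     return ' '.join(map(str, sorted(odd)))
-- ===== Notes on version B (the rewrite author's own statement) =====
-- stated objective: simpler
-- what changed: Replaces the counting dict plus parity-filter pass with a single parity-toggling set (present iff seen an odd number of times), eliminating the count/filter stage.
import Mathlib
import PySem

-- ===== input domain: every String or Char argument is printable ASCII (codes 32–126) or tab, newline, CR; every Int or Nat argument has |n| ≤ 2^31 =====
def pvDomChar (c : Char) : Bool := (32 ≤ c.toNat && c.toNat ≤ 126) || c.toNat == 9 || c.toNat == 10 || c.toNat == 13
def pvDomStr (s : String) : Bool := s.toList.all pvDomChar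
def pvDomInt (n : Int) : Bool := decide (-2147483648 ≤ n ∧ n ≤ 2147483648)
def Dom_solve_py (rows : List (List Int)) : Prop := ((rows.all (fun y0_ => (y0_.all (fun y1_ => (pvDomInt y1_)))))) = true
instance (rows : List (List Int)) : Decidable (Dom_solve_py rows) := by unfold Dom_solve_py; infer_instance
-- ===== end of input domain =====

-- B replaces A's counting-dict + parity-filter passes by a single parity-toggling set (simpler, one stage fewer).


-- ===== PORT A =====
def solve_py (rows : List (List Int)) : String :=
  let seen : PySem.Dict Int Int :=
    rows.foldl (fun seen row =>
      row.foldl (fun seen elem =>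
        if seen.contains elem = false then seen.insert elem 1
        else seen.modify elem 0 (· + 1)) seen) PySem.Dict.empty
  let res : List Int :=
    seen.items.foldl (fun res p =>
      if PySem.Int.mod p.2 2 = 1 then res ++ [p.1] else res) []
  let res' := PySem.List.sorted res (fun x => x) false
  PySem.Str.join " " (res'.map PySem.Int.toStr)

-- ===== PORT B =====
-- odd.remove(elem) under the 'elem in odd' guard is ported as Set.discard (identical on present elements).
def solve_py_alt (rows : List (List Int)) : String :=
  let odd : PySem.Set Int :=
    rows.foldl (fun odd row =>
      row.foldl (fun odd elem =>
        if PySem.Set.contains odd elem then PySem.Set.discard odd elem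
        else PySem.Set.add odd elem) odd) PySem.Set.empty
  PySem.Str.join " " ((PySem.List.sorted odd (fun x => x) false).map PySem.Int.toStr)

-- ===== PRECONDITION & SPEC =====
def Spec_solve_py (rows : List (List Int)) (out : String) : Prop := out = solve_py_alt rows
instance (rows : List (List Int)) (out : String) : Decidable (Spec_solve_py rows out) := by unfold Spec_solve_py; infer_instance

-- ===== CLAIM (what is proved, stated in full; the proofs are below) =====
def Claim_equal_solve_py : Prop := ∀ (rows : List (List Int)), Dom_solve_py rows → Spec_solve_py rows (solve_py rows)

-- ===== LEMMAS AND PROOFS =====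

-- A's conditional counting step is exactly the Counter step.
theorem stepA_eq_counter_step (d : PySem.Dict Int Int) (e : Int) :
    (if d.contains e = false then d.insert e 1 else d.modify e 0 (· + 1)) =
      d.modify e 0 (· + 1) := by
  by_cases h : d.contains e = false
  · simp [h, PySem.Dict.modify, PySem.Dict.getD_of_not_contains d 0 h]
  · simp [h]

-- B's toggle step membership.
theorem mem_toggle_step (s : PySem.Set Int) (e x : Int) :
    x ∈ (if PySem.Set.contains s e then PySem.Set.discard s e else PySem.Set.add s e) ↔
      (if x = e then x ∉ s else x ∈ s) := by
  by_cases hc : PySem.Set.contains s e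
  · have hm : e ∈ s := (PySem.Set.contains_iff s e).mp hc
    rw [if_pos hc, PySem.Set.mem_discard]
    by_cases hx : x = e <;> simp [hx, hm]
  · have hm : e ∉ s := fun h => hc ((PySem.Set.contains_iff s e).mpr h)
    rw [if_neg hc, PySem.Set.mem_add]
    by_cases hx : x = e <;> simp [hx, hm]

theorem nodup_toggle_step (s : PySem.Set Int) (e : Int) (h : s.Nodup) :
    (if PySem.Set.contains s e then PySem.Set.discard s e else PySem.Set.add s e).Nodup := by
  by_cases hc : PySem.Set.contains s e
  · rw [if_pos hc]; exact PySem.Set.nodup_discard s e h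
  · rw [if_neg hc]; exact PySem.Set.nodup_add s e h

-- The toggle fold over a flat list: nodup is preserved and membership is the parity XOR.
theorem toggle_fold (xs : List Int) :
    ∀ (s : PySem.Set Int), s.Nodup →
      (xs.foldl (fun odd elem =>
        if PySem.Set.contains odd elem then PySem.Set.discard odd elem
        else PySem.Set.add odd elem) s).Nodup ∧
      (∀ x, x ∈ (xs.foldl (fun odd elem =>
        if PySem.Set.contains odd elem then PySem.Set.discard odd elem
        else PySem.Set.add odd elem) s) ↔ ((x ∈ s) ↔ (xs.count x) % 2 = 0)) := by
  induction xs with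
  | nil => intro s hs; refine ⟨hs, fun x => by simp⟩
  | cons e xs ih =>
    intro s hs
    obtain ⟨hn, hmem⟩ := ih _ (nodup_toggle_step s e hs)
    refine ⟨hn, fun x => ?_⟩
    rw [List.foldl_cons, hmem x, mem_toggle_step]
    by_cases hx : x = e
    · subst hx
      rw [if_pos rfl, List.count_cons_self]
      have hpar : (List.count x xs + 1) % 2 = 0 ↔ ¬ (List.count x xs % 2 = 0) := by omega
      rw [hpar]
      tauto
    · have hcnt : List.count x (e :: xs) = List.count x xs := by
        have hne : ¬ e = x := fun h => hx h.symm
        rw [List.count_cons]; simp [hne]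
      rw [if_neg hx, hcnt]

-- A's counting loop is Counter of the flattened input.
theorem seen_eq_counter (rows : List (List Int)) :
    rows.foldl (fun seen row =>
      row.foldl (fun seen elem =>
        if seen.contains elem = false then seen.insert elem 1
        else seen.modify elem 0 (· + 1)) seen) PySem.Dict.empty =
      PySem.Dict.counter rows.flatten := by
  rw [PySem.Dict.counter_eq_foldl, List.foldl_flatten]
  simp only [stepA_eq_counter_step]

-- A's filtering loop is a filter.
theorem res_foldl (l : List (Int × Int)) (acc : List Int) :
    l.foldl (fun res p =>
      if PySem.Int.mod p.2 2 = 1 then res ++ [p.1] else res) acc =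
      acc ++ (l.filter (fun p => decide (PySem.Int.mod p.2 2 = 1))).map (·.1) := by
  induction l generalizing acc with
  | nil => simp
  | cons p l ih =>
    rw [List.foldl_cons, ih, List.filter_cons]
    split
    · next h =>
        rw [decide_eq_true h, if_pos rfl]
        simp
    · next h =>
        rw [decide_eq_false h, if_neg Bool.false_ne_true]

-- Python's cnt % 2 == 1 on a count is parity-of-count.
theorem mod_count_eq_one (c : Nat) : PySem.Int.mod (c : Int) 2 = 1 ↔ c % 2 = 1 := by
  simp [PySem.Int.mod, Int.fmod_eq_emod]
  omega

-- The two result lists are permutations of each other.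
theorem res_perm_odd (rows : List (List Int)) :
    ((PySem.Set.ofList rows.flatten).filter
        (fun k => decide (PySem.Int.mod ((rows.flatten.count k : Nat) : Int) 2 = 1))).Perm
      (rows.foldl (fun odd row =>
        row.foldl (fun odd elem =>
          if PySem.Set.contains odd elem then PySem.Set.discard odd elem
          else PySem.Set.add odd elem) odd) PySem.Set.empty) := by
  rw [List.foldl_flatten.symm]
  obtain ⟨hn, hmem⟩ := toggle_fold rows.flatten PySem.Set.empty (by simp [PySem.Set.empty])
  refine (List.perm_ext_iff_of_nodup
    (List.Nodup.filter _ (PySem.Set.nodup_ofList _)) hn).mpr (fun x => ?_)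
  rw [List.mem_filter, hmem x, PySem.Set.mem_ofList, decide_eq_true_eq, mod_count_eq_one]
  constructor
  · intro ⟨_, h2⟩; simp [PySem.Set.empty]; omega
  · intro h
    simp only [PySem.Set.empty, List.not_mem_nil, false_iff] at h
    have hpos : 0 < rows.flatten.count x := by omega
    exact ⟨List.count_pos_iff.mp hpos, by omega⟩

-- ===== VERDICT (by name: the statement is the Claim_ definition above) =====
theorem solve_py_spec : Claim_equal_solve_py := by
  intro rows _
  simp only [Spec_solve_py, solve_py, solve_py_alt]
  rw [seen_eq_counter, res_foldl, PySem.Dict.items_counter, List.nil_append]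
  rw [List.filter_map, List.map_map]
  have h1 : ((fun p : Int × Int => p.1) ∘ fun k : Int => (k, (rows.flatten.count k : Int))) = id := rfl
  rw [h1, List.map_id]
  congr 1
  congr 1
  exact (PySem.List.sorted_id_eq_sorted_id_iff_perm _ _).mpr (res_perm_odd rows)
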